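-- pv_equiv track=rewrite | github.com/gahjelle/advent_of_code | python/src/2024/10_hoof_it/aoc202410.py | walk
-- ===== SOURCE A (Python) =====
-- import collections
--
-- def walk(grid, start, target=9):
--     """Walk the grid and count how many paths that can be walked to reach targets."""
--     layer = {start: 1}
--     for height in range(1, target + 1):
--         new_layer = collections.defaultdict(int)
--         for pos, num_paths in layer.items():
--             for dir in [(0, 1), (1, 0), (0, -1), (-1, 0)]:
--                 new_pos = (pos[0] + dir[0], pos[1] + dir[1])
--                 if grid.get(new_pos) == height:
--                     new_layer[new_pos] += num_paths
--         layer, new_layer = new_layer, collections.defaultdict(int)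
--
--     return layer
-- ===== SOURCE B (Python) =====
-- import collections
--
-- def walk(grid, start, target=9):
--     """Count paths by pulling each frontier cell's total from its predecessors.
--
--     Gather formulation: per height, first find the frontier (new cells of that
--     height, in first-reached order), then compute each cell's path count by a
--     lookup sum over its four predecessor neighbors in the previous layer,
--     instead of A's scatter that pushes each old cell's count into a defaultdict.
--     """
--     dirs = [(0, 1), (1, 0), (0, -1), (-1, 0)]
--     layer = {start: 1}
--     for height in range(1, target + 1):
--         frontier = dict.fromkeys(
--             (p[0] + d[0], p[1] + d[1])
--             for p in layer for d in dirs
--             if grid.get((p[0] + d[0], p[1] + d[1])) == height)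
--         layer = {c: sum(layer.get((c[0] + d[0], c[1] + d[1]), 0) for d in dirs)
--                  for c in frontier}
--     return collections.defaultdict(int, layer)
-- ===== Notes on version B (the rewrite author's own statement) =====
-- stated objective: alternative
-- what changed: B replaces A's scatter ('push') accumulation -- each old cell adds its count into a defaultdict entry of every valid neighbor -- by a gather ('pull') formulation: per height it first materialises the frontier of new cells (first-reached order) and then computes each frontier cell's count directly as a lookup sum over its four predecessor neighbors in the previous layer, with no accumulator dict at all.
import Mathlib
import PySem

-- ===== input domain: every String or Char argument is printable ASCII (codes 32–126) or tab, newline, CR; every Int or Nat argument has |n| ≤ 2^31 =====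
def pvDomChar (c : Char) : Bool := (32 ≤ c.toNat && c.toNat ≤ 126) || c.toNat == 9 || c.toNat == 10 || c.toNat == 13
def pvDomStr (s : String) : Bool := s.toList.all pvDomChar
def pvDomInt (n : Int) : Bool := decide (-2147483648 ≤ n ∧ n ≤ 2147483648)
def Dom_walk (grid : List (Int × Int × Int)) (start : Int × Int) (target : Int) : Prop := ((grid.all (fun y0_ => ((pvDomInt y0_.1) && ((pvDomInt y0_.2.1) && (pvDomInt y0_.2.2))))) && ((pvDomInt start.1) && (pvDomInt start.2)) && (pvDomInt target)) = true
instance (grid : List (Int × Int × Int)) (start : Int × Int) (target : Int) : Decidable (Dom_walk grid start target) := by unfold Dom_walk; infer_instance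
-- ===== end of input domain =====

-- B replaces A's scatter ('push') accumulation into a defaultdict by a gather ('pull')
-- formulation: frontier of new cells first, then each cell's count as a lookup sum over
-- its predecessor neighbors; objective: alternative (not faster).

-- grid is a dict[(int,int),int] passed as an association list (lookup = first match)
def pyGridGet (grid : List (Int × Int × Int)) (p : Int × Int) : Option Int :=
  (grid.find? (fun e => e.1 == p.1 && e.2.1 == p.2)).map (fun e => e.2.2)

def walkDirs : List (Int × Int) := [(0, 1), (1, 0), (0, -1), (-1, 0)]

-- ===== PORT A =====
def walk (grid : List (Int × Int × Int)) (start : Int × Int) (target : Int) : List (Int × Int × Int) :=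
  let final := (PySem.List.pyRange 1 (target + 1) 1).foldl
    (fun layer height =>
      layer.items.foldl
        (fun nl pn =>
          walkDirs.foldl
            (fun nl d =>
              let np : Int × Int := (pn.1.1 + d.1, pn.1.2 + d.2)
              if pyGridGet grid np == some height then nl.modify np 0 (fun v => v + pn.2) else nl)
            nl)
        PySem.Dict.empty)
    ((PySem.Dict.empty : PySem.Dict (Int × Int) Int).insert start 1)
  final.items.map (fun p => (p.1.1, p.1.2, p.2))

-- ===== PORT B =====
-- frontier = dict.fromkeys(… for p in layer for d in dirs if grid.get(new) == height)
def walkFrontier (grid : List (Int × Int × Int)) (height : Int)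
    (layer : PySem.Dict (Int × Int) Int) : List (Int × Int) :=
  PySem.Set.ofList
    (layer.keys.flatMap (fun p =>
      (walkDirs.map (fun d => (p.1 + d.1, p.2 + d.2))).filter
        (fun np => pyGridGet grid np == some height)))

-- layer = {c: sum(layer.get((c+d), 0) for d in dirs) for c in frontier}
def walkStep (grid : List (Int × Int × Int)) (height : Int)
    (layer : PySem.Dict (Int × Int) Int) : PySem.Dict (Int × Int) Int :=
  (walkFrontier grid height layer).foldl
    (fun d c =>
      d.insert c ((walkDirs.map (fun dd => layer.getD (c.1 + dd.1, c.2 + dd.2) 0)).sum))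
    PySem.Dict.empty

def walk_alt (grid : List (Int × Int × Int)) (start : Int × Int) (target : Int) : List (Int × Int × Int) :=
  let final := (PySem.List.pyRange 1 (target + 1) 1).foldl
    (fun layer height => walkStep grid height layer)
    ((PySem.Dict.empty : PySem.Dict (Int × Int) Int).insert start 1)
  final.items.map (fun p => (p.1.1, p.1.2, p.2))

-- ===== PRECONDITION & SPEC =====
def Spec_walk (grid : List (Int × Int × Int)) (start : Int × Int) (target : Int) (out : List (Int × Int × Int)) : Prop := out = walk_alt grid start target
instance (grid : List (Int × Int × Int)) (start : Int × Int) (target : Int) (out : List (Int × Int × Int)) : Decidable (Spec_walk grid start target out) := by unfold Spec_walk; infer_instance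

-- ===== CLAIM (what is proved, stated in full; the proofs are below) =====
def Claim_equal_walk : Prop := ∀ (grid : List (Int × Int × Int)) (start : Int × Int) (target : Int), Dom_walk grid start target → Spec_walk grid start target (walk grid start target)

-- ===== LEMMAS AND PROOFS =====

-- the flat contribution list A's two inner loops traverse (proof-only helper)
def walkEvents (grid : List (Int × Int × Int)) (height : Int)
    (layer : PySem.Dict (Int × Int) Int) : List ((Int × Int) × Int) :=
  layer.items.flatMap (fun pn =>
    (walkDirs.map (fun d => ((pn.1.1 + d.1, pn.1.2 + d.2), pn.2))).filter
      (fun e => pyGridGet grid e.1 == some height))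

theorem foldl_flatMap_eq {α β γ : Type} (l : List α) (G : α → List β) (g : γ → β → γ) (init : γ) :
    l.foldl (fun acc x => (G x).foldl g acc) init = (l.flatMap G).foldl g init := by
  induction l generalizing init with
  | nil => rfl
  | cons a t ih => simp [List.flatMap_cons, List.foldl_append, ih]

theorem getD_foldl_modify_add (events : List ((Int × Int) × Int))
    (d : PySem.Dict (Int × Int) Int) (k : Int × Int) :
    (events.foldl (fun d e => d.modify e.1 0 (fun v => v + e.2)) d).getD k 0
      = d.getD k 0 + ((events.filter (fun e => e.1 == k)).map (fun e => e.2)).sum := by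
  induction events generalizing d with
  | nil => simp
  | cons e t ih =>
    simp only [List.foldl_cons, ih, List.filter_cons]
    by_cases h : e.1 = k
    · subst h
      simp
      ring
    · have hb : (e.1 == k) = false := by simp [h]
      rw [PySem.Dict.getD_modify]
      simp [Ne.symm h, hb]

-- sum of the values of the items with key c, in a dict with distinct keys, is a lookup
theorem sum_flatMap_int {α : Type} (l : List α) (f : α → List Int) :
    (l.flatMap f).sum = (l.map (fun x => (f x).sum)).sum := by
  induction l with
  | nil => rfl
  | cons a t ih => simp [List.flatMap_cons, ih]

theorem sum_ite_key_eq_getD (l : List ((Int × Int) × Int))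
    (h : (l.map (fun e => e.1)).Nodup) (c : Int × Int) :
    (l.map (fun pn => if pn.1 = c then pn.2 else 0)).sum
      = (PySem.Dict.mk l).getD c 0 := by
  induction l with
  | nil => simp [PySem.Dict.getD_eq_get?_getD, PySem.Dict.get?]
  | cons e t ih =>
    obtain ⟨ek, ev⟩ := e
    simp only [List.map_cons, List.nodup_cons] at h
    rw [List.map_cons, List.sum_cons, PySem.Dict.getD_eq_get?_getD,
      PySem.Dict.get?_mk_cons]
    by_cases hc : ek = c
    · subst hc
      have hz : (t.map (fun pn => if pn.1 = ek then pn.2 else 0)).sum = 0 := by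
        apply List.sum_eq_zero
        intro x hx
        simp only [List.mem_map] at hx
        obtain ⟨pn, hpn, hxeq⟩ := hx
        have hne : pn.1 ≠ ek := by
          intro hk
          exact h.1 (hk ▸ List.mem_map_of_mem (f := fun e => e.1) hpn)
        simp [hne] at hxeq
        omega
      simp [hz]
    · simp [hc, ← PySem.Dict.getD_eq_get?_getD, ih h.2]

-- the frontier B computes is exactly the (dedup'ed) key list of A's contribution events
theorem frontier_eq (grid : List (Int × Int × Int)) (height : Int)
    (layer : PySem.Dict (Int × Int) Int) :
    walkFrontier grid height layer
      = PySem.Set.ofList ((walkEvents grid height layer).map (fun e => e.1)) := by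
  unfold walkFrontier walkEvents
  congr 1
  rw [List.map_flatMap]
  simp only [PySem.Dict.keys]
  rw [List.flatMap_map]
  apply List.flatMap_congr
  intro pn _
  simp only [walkDirs, List.map_cons, List.map_nil, List.filter_cons, List.filter_nil]
  split_ifs <;> simp_all

theorem sum_filter_map {α β : Type} (l : List α) (g : α → β) (p : β → Bool) (f : β → Int) :
    (((l.map g).filter p).map f).sum = (l.map (fun x => if p (g x) then f (g x) else 0)).sum := by
  induction l with
  | nil => rfl
  | cons a t ih =>
    simp only [List.map_cons, List.filter_cons]
    by_cases h : p (g a) <;> simp [h, ih]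

-- each frontier cell's event sum equals the pull over its four neighbors
theorem eventsum_eq_pull (grid : List (Int × Int × Int)) (height : Int)
    (layer : PySem.Dict (Int × Int) Int) (hnd : layer.keys.Nodup) (k : Int × Int)
    (hk : pyGridGet grid k = some height) :
    (((walkEvents grid height layer).filter (fun e => e.1 == k)).map (fun e => e.2)).sum
      = (walkDirs.map (fun dd => layer.getD (k.1 + dd.1, k.2 + dd.2) 0)).sum := by
  unfold walkEvents
  rw [List.filter_flatMap, List.map_flatMap, sum_flatMap_int]
  have hstep : ∀ pn : (Int × Int) × Int,
      (((((walkDirs.map (fun d => ((pn.1.1 + d.1, pn.1.2 + d.2), pn.2))).filter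
            (fun e => pyGridGet grid e.1 == some height)).filter
          (fun e => e.1 == k)).map (fun e => e.2)).sum : Int)
        = (walkDirs.map (fun d =>
            if pn.1 = (k.1 - d.1, k.2 - d.2) then pn.2 else 0)).sum := by
    intro pn
    rw [List.filter_filter, sum_filter_map]
    apply congrArg
    apply List.map_congr_left
    intro d _
    by_cases hd : pn.1 = (k.1 - d.1, k.2 - d.2)
    · have h1 : (pn.1.1 + d.1, pn.1.2 + d.2) = k := by
        cases k with | mk k1 k2 =>
          rw [Prod.ext_iff] at hd
          simp at hd ⊢
          omega
      rw [h1]; simp [hk, hd]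
    · have h1 : ((pn.1.1 + d.1, pn.1.2 + d.2) == k) = false := by
        cases k with | mk k1 k2 =>
          rw [Prod.ext_iff] at hd
          simp at hd ⊢
          intro a; omega
      simp [h1, hd]
  rw [List.map_congr_left (fun pn _ => hstep pn)]
  -- swap the two finite sums (dirs is a 4-element literal list)
  have hsplit :
      (layer.items.map (fun pn =>
        (walkDirs.map (fun d => if pn.1 = (k.1 - d.1, k.2 - d.2) then pn.2 else 0)).sum)).sum
      = ((walkDirs.map (fun d =>
          (layer.items.map (fun pn =>
            if pn.1 = (k.1 - d.1, k.2 - d.2) then pn.2 else 0)).sum)).sum : Int) := by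
    simp only [walkDirs, List.map_cons, List.map_nil, List.sum_cons, List.sum_nil, add_zero]
    rw [List.sum_map_add, List.sum_map_add, List.sum_map_add]
  rw [hsplit]
  have hkey : ∀ d : Int × Int,
      ((layer.items.map (fun pn =>
        if pn.1 = (k.1 - d.1, k.2 - d.2) then pn.2 else 0)).sum : Int)
        = layer.getD (k.1 - d.1, k.2 - d.2) 0 := by
    intro d
    rw [sum_ite_key_eq_getD layer.items hnd (k.1 - d.1, k.2 - d.2)]
  simp only [walkDirs, List.map_cons, List.map_nil, List.sum_cons, List.sum_nil,
    hkey (0, 1), hkey (1, 0), hkey (0, -1), hkey (-1, 0)]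
  have e1 : (k.1 - 0, k.2 - 1) = (k.1 + 0, k.2 + (-1)) := by
    simp only [Prod.mk.injEq]; omega
  have e2 : (k.1 - 1, k.2 - 0) = (k.1 + (-1), k.2 + 0) := by
    simp only [Prod.mk.injEq]; omega
  have e3 : (k.1 - 0, k.2 - (-1)) = (k.1 + 0, k.2 + 1) := by
    simp only [Prod.mk.injEq]; omega
  have e4 : (k.1 - (-1), k.2 - 0) = (k.1 + 1, k.2 + 0) := by
    simp only [Prod.mk.injEq]; omega
  rw [e1, e2, e3, e4]
  ring

theorem walk_step_eq (grid : List (Int × Int × Int)) (height : Int)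
    (layer : PySem.Dict (Int × Int) Int) (hnd : layer.keys.Nodup) :
    layer.items.foldl
      (fun nl pn =>
        walkDirs.foldl
          (fun nl d =>
            let np : Int × Int := (pn.1.1 + d.1, pn.1.2 + d.2)
            if pyGridGet grid np == some height then nl.modify np 0 (fun v => v + pn.2) else nl)
          nl)
      PySem.Dict.empty
      = walkStep grid height layer := by
  -- A's nested loops are one accumulation over the flat event list
  have h1 : layer.items.foldl
      (fun nl pn =>
        walkDirs.foldl
          (fun nl d =>
            let np : Int × Int := (pn.1.1 + d.1, pn.1.2 + d.2)
            if pyGridGet grid np == some height then nl.modify np 0 (fun v => v + pn.2) else nl)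
          nl)
      PySem.Dict.empty
      = (walkEvents grid height layer).foldl
          (fun nl e => nl.modify e.1 0 (fun v => v + e.2)) PySem.Dict.empty := by
    rw [walkEvents, ← foldl_flatMap_eq]
    apply PySem.List.foldl_congr_mem
    intro acc pn _
    simp only [walkDirs, List.map_cons, List.map_nil, List.filter_cons, List.filter_nil,
      List.foldl_cons, List.foldl_nil]
    split_ifs <;> rfl
  rw [h1, walkStep]
  -- both sides have the same (nodup) keys in the same order and the same values
  have hkeysA : ((walkEvents grid height layer).foldl
      (fun nl e => nl.modify e.1 0 (fun v => v + e.2)) PySem.Dict.empty).keys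
      = PySem.Set.ofList ((walkEvents grid height layer).map (fun e => e.1)) := by
    rw [PySem.Dict.keys_foldl_modify_key (walkEvents grid height layer)
        (fun e => e.1) 0 (fun _ e v => v + e.2) PySem.Dict.empty]
    simp [PySem.Dict.keys_empty, PySem.Set.update_nil_left]
  have hnodupA : ((walkEvents grid height layer).foldl
      (fun nl e => nl.modify e.1 0 (fun v => v + e.2)) PySem.Dict.empty).keys.Nodup := by
    exact PySem.Dict.nodup_keys_foldl_modify_key (walkEvents grid height layer)
      (fun e => e.1) 0 (fun _ e v => v + e.2) PySem.Dict.empty (by simp [PySem.Dict.keys_empty])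
  have hfresh : ∀ k ∈ walkFrontier grid height layer,
      (PySem.Dict.empty : PySem.Dict (Int × Int) Int).contains k = false := by
    intro k _; simp [PySem.Dict.contains_empty]
  apply PySem.Dict.ext
  rw [PySem.Dict.items_eq_map_keys _ hnodupA 0, hkeysA, ← frontier_eq]
  rw [PySem.Dict.items_foldl_insert_fresh
      (k := fun c => c)
      (v := fun c => (walkDirs.map (fun dd => layer.getD (c.1 + dd.1, c.2 + dd.2) 0)).sum)
      _ _ hfresh (by simp [frontier_eq, PySem.Set.nodup_ofList])]
  rw [show (PySem.Dict.empty : PySem.Dict (Int × Int) Int).items = [] from rfl, List.nil_append]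
  apply List.map_congr_left
  intro k hkmem
  have hkgrid : pyGridGet grid k = some height := by
    have := hkmem
    unfold walkFrontier at this
    rw [PySem.Set.mem_ofList] at this
    simp only [List.mem_flatMap, List.mem_filter] at this
    obtain ⟨p, -, -, hp⟩ := this
    simpa using hp
  rw [getD_foldl_modify_add]
  rw [PySem.Dict.getD_empty, zero_add]
  exact congrArg (Prod.mk k) (eventsum_eq_pull grid height layer hnd k hkgrid)

theorem nodup_keys_stepA (grid : List (Int × Int × Int)) (height : Int)
    (layer : PySem.Dict (Int × Int) Int) :
    (layer.items.foldl
      (fun nl pn =>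
        walkDirs.foldl
          (fun nl d =>
            let np : Int × Int := (pn.1.1 + d.1, pn.1.2 + d.2)
            if pyGridGet grid np == some height then nl.modify np 0 (fun v => v + pn.2) else nl)
          nl)
      PySem.Dict.empty).keys.Nodup := by
  have h1 : layer.items.foldl
      (fun nl pn =>
        walkDirs.foldl
          (fun nl d =>
            let np : Int × Int := (pn.1.1 + d.1, pn.1.2 + d.2)
            if pyGridGet grid np == some height then nl.modify np 0 (fun v => v + pn.2) else nl)
          nl)
      PySem.Dict.empty
      = (walkEvents grid height layer).foldl
          (fun nl e => nl.modify e.1 0 (fun v => v + e.2)) PySem.Dict.empty := by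
    rw [walkEvents, ← foldl_flatMap_eq]
    apply PySem.List.foldl_congr_mem
    intro acc pn _
    simp only [walkDirs, List.map_cons, List.map_nil, List.filter_cons, List.filter_nil,
      List.foldl_cons, List.foldl_nil]
    split_ifs <;> rfl
  rw [h1]
  exact PySem.Dict.nodup_keys_foldl_modify_key (walkEvents grid height layer)
    (fun e => e.1) 0 (fun _ e v => v + e.2) PySem.Dict.empty (by simp [PySem.Dict.keys_empty])

theorem walk_fold_eq (grid : List (Int × Int × Int)) (L : List Int) :
    ∀ layer : PySem.Dict (Int × Int) Int, layer.keys.Nodup →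
    L.foldl
      (fun layer height =>
        layer.items.foldl
          (fun nl pn =>
            walkDirs.foldl
              (fun nl d =>
                let np : Int × Int := (pn.1.1 + d.1, pn.1.2 + d.2)
                if pyGridGet grid np == some height then nl.modify np 0 (fun v => v + pn.2) else nl)
              nl)
          PySem.Dict.empty) layer
      = L.foldl (fun layer height => walkStep grid height layer) layer := by
  induction L with
  | nil => intro layer _; rfl
  | cons h t ih =>
    intro layer hnd
    simp only [List.foldl_cons]
    rw [walk_step_eq grid h layer hnd, ← walk_step_eq grid h layer hnd]
    rw [ih _ (nodup_keys_stepA grid h layer), walk_step_eq grid h layer hnd]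

-- ===== VERDICT (by name: the statement is the Claim_ definition above) =====
theorem walk_spec : Claim_equal_walk := by
  intro grid start target _
  show walk grid start target = walk_alt grid start target
  unfold walk walk_alt
  rw [walk_fold_eq grid _ _ (by
    have := PySem.Dict.nodup_keys_insert
      (d := (PySem.Dict.empty : PySem.Dict (Int × Int) Int)) (k := start) (v := (1 : Int))
      (by simp [PySem.Dict.keys_empty])
    exact this)]
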